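-- pv_equiv track=rewrite | github.com/Rudolph001/DataGuardian | app_fixed.py | _calculate_edge_color
-- ===== SOURCE A (Python) =====
-- def _calculate_edge_color(risk_levels):
--     """Calculate edge color based on risk levels"""
--     if not risk_levels:
--         return '#888'
--
--     risk_mapping = {'critical': 4, 'high': 3, 'medium': 2, 'low': 1, 'unknown': 0}
--     max_risk = max(risk_mapping.get(level.lower(), 0) for level in risk_levels)
--
--     color_mapping = {
--         4: '#ff4444',  # Critical - Red
--         3: '#ff8800',  # High - Orange
--         2: '#ffcc00',  # Medium - Yellow
--         1: '#44aa44',  # Low - Green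
--         0: '#888888'   # Unknown - Gray
--     }
--
--     return color_mapping.get(max_risk, '#888888')
-- ===== SOURCE B (Python) =====
-- def _calculate_edge_color(risk_levels):
--     """Calculate edge color based on risk levels (priority-chain re-implementation)"""
--     if not risk_levels:
--         return '#888'
--     levels = {level.lower() for level in risk_levels}
--     if 'critical' in levels:
--         return '#ff4444'
--     if 'high' in levels:
--         return '#ff8800'
--     if 'medium' in levels:
--         return '#ffcc00'
--     if 'low' in levels:
--         return '#44aa44'
--     return '#888888'
-- ===== Notes on version B (the rewrite author's own statement) =====
-- stated objective: simpler
-- what changed: Replaced the numeric max over a rank dict followed by a reverse color lookup with a lowercased set and a descending-priority membership chain that returns the first matching level's color.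
import Mathlib
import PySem

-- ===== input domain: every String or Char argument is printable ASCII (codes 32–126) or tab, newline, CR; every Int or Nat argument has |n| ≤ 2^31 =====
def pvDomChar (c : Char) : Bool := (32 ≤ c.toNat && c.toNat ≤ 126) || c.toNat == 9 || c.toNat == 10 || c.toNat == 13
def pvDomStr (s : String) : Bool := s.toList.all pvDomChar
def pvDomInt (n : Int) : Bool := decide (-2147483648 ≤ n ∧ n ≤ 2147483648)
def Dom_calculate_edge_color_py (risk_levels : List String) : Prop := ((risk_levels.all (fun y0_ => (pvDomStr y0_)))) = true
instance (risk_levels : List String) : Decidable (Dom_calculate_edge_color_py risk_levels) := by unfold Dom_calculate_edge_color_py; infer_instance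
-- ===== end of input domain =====

-- B replaces A's numeric max over a rank dict + reverse color lookup with a lowercased set
-- and a descending-priority membership chain (objective: simpler).


-- ===== PORT A =====
-- risk_mapping.get(level, 0) as a branch chain over the five keys
def pvRiskRank (s : String) : Int :=
  if s = "critical" then 4
  else if s = "high" then 3
  else if s = "medium" then 2
  else if s = "low" then 1
  else if s = "unknown" then 0
  else 0

-- color_mapping.get(max_risk, '#888888')
def pvColorOf (n : Int) : String :=
  if n = 4 then "#ff4444"
  else if n = 3 then "#ff8800"
  else if n = 2 then "#ffcc00"
  else if n = 1 then "#44aa44"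
  else if n = 0 then "#888888"
  else "#888888"

def calculate_edge_color_py (risk_levels : List String) : String :=
  if risk_levels = [] then "#888"
  else
    let scores := risk_levels.map (fun level => pvRiskRank (PySem.Str.lower level))
    match PySem.List.max? scores (fun x => x) with
    | none => "#888"        -- unreachable: scores nonempty
    | some max_risk => pvColorOf max_risk

-- ===== PORT B =====
def calculate_edge_color_py_alt (risk_levels : List String) : String :=
  if risk_levels = [] then "#888"
  else
    let levels := PySem.Set.ofList (risk_levels.map (fun level => PySem.Str.lower level))
    if PySem.Set.contains levels "critical" then "#ff4444"
    else if PySem.Set.contains levels "high" then "#ff8800"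
    else if PySem.Set.contains levels "medium" then "#ffcc00"
    else if PySem.Set.contains levels "low" then "#44aa44"
    else "#888888"

-- ===== PRECONDITION & SPEC =====
def Spec_calculate_edge_color_py (risk_levels : List String) (out : String) : Prop := out = calculate_edge_color_py_alt risk_levels
instance (risk_levels : List String) (out : String) : Decidable (Spec_calculate_edge_color_py risk_levels out) := by unfold Spec_calculate_edge_color_py; infer_instance

-- ===== CLAIM (what is proved, stated in full; the proofs are below) =====
def Claim_equal_calculate_edge_color_py : Prop := ∀ (risk_levels : List String), Dom_calculate_edge_color_py risk_levels → Spec_calculate_edge_color_py risk_levels (calculate_edge_color_py risk_levels)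

-- ===== LEMMAS AND PROOFS =====

lemma pvRiskRank_le (s : String) : pvRiskRank s ≤ 4 := by
  unfold pvRiskRank; split_ifs <;> norm_num

lemma pvRiskRank_ge4 (s : String) (h : 4 ≤ pvRiskRank s) : s = "critical" := by
  unfold pvRiskRank at h; split_ifs at h <;> simp_all

lemma pvRiskRank_ge3 (s : String) (h : 3 ≤ pvRiskRank s) : s = "critical" ∨ s = "high" := by
  unfold pvRiskRank at h; split_ifs at h <;> simp_all

lemma pvRiskRank_ge2 (s : String) (h : 2 ≤ pvRiskRank s) :
    s = "critical" ∨ s = "high" ∨ s = "medium" := by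
  unfold pvRiskRank at h; split_ifs at h <;> simp_all

lemma pvRiskRank_ge1 (s : String) (h : 1 ≤ pvRiskRank s) :
    s = "critical" ∨ s = "high" ∨ s = "medium" ∨ s = "low" := by
  unfold pvRiskRank at h; split_ifs at h <;> simp_all

lemma pvSet_contains_iff (ys : List String) (c : String) :
    PySem.Set.contains (PySem.Set.ofList ys) c = true ↔ c ∈ ys := by
  simp [PySem.Set.contains, PySem.Set.mem_ofList]

lemma pv_main (xs : List String) :
    calculate_edge_color_py xs = calculate_edge_color_py_alt xs := by
  unfold calculate_edge_color_py calculate_edge_color_py_alt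
  by_cases hx : xs = []
  · simp [hx]
  · simp only [if_neg hx]
    set ys := xs.map (fun level => PySem.Str.lower level) with hys
    have hne : ys ≠ [] := by simp [hys, hx]
    have hsne : ys.map pvRiskRank ≠ [] := by simp [hne]
    have hcomp : List.map (fun level => pvRiskRank (PySem.Str.lower level)) xs
        = ys.map pvRiskRank := by simp [hys, List.map_map, Function.comp]
    obtain ⟨m, hm⟩ : ∃ m, PySem.List.max? (ys.map pvRiskRank) (fun x => x) = some m := by
      cases h : PySem.List.max? (ys.map pvRiskRank) (fun x => x) with
      | none => exact absurd ((PySem.List.max?_eq_none_iff _ _).mp h) hsne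
      | some m => exact ⟨m, rfl⟩
    have hmem : m ∈ ys.map pvRiskRank := PySem.List.max?_mem hm
    have hmax : ∀ z ∈ ys.map pvRiskRank, z ≤ m := fun z hz => PySem.List.max?_isMax hm z hz
    obtain ⟨w, hw, hwm⟩ := List.mem_map.mp hmem
    rw [hcomp, hm]
    by_cases hc : "critical" ∈ ys
    · have h4 : (4 : Int) ≤ m := by
        have := hmax (pvRiskRank "critical") (List.mem_map.mpr ⟨_, hc, rfl⟩)
        simpa [pvRiskRank] using this
      have hle : m ≤ 4 := hwm ▸ pvRiskRank_le w
      have : m = 4 := le_antisymm hle h4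
      rw [if_pos ((pvSet_contains_iff ys "critical").mpr hc), this]
      rfl
    · rw [if_neg (by simp [PySem.Set.contains, PySem.Set.mem_ofList, hc])]
      have hne4 : m ≠ 4 := fun h => hc (by
        have := pvRiskRank_ge4 w (by omega : 4 ≤ pvRiskRank w)
        exact this ▸ hw)
      by_cases hh : "high" ∈ ys
      · have h3 : (3 : Int) ≤ m := by
          have := hmax (pvRiskRank "high") (List.mem_map.mpr ⟨_, hh, rfl⟩)
          simpa [pvRiskRank] using this
        have hle : m ≤ 4 := hwm ▸ pvRiskRank_le w
        have : m = 3 := by omega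
        rw [if_pos ((pvSet_contains_iff ys "high").mpr hh), this]
        rfl
      · rw [if_neg (by simp [PySem.Set.contains, PySem.Set.mem_ofList, hh])]
        have hne3 : m ≠ 3 := fun h => by
          rcases pvRiskRank_ge3 w (by omega : 3 ≤ pvRiskRank w) with h' | h'
          · exact hc (h' ▸ hw)
          · exact hh (h' ▸ hw)
        by_cases hmed : "medium" ∈ ys
        · have h2 : (2 : Int) ≤ m := by
            have := hmax (pvRiskRank "medium") (List.mem_map.mpr ⟨_, hmed, rfl⟩)
            simpa [pvRiskRank] using this
          have hle : m ≤ 4 := hwm ▸ pvRiskRank_le w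
          have : m = 2 := by omega
          rw [if_pos ((pvSet_contains_iff ys "medium").mpr hmed), this]
          rfl
        · rw [if_neg (by simp [PySem.Set.contains, PySem.Set.mem_ofList, hmed])]
          have hne2 : m ≠ 2 := fun h => by
            rcases pvRiskRank_ge2 w (by omega : 2 ≤ pvRiskRank w) with h' | h' | h'
            · exact hc (h' ▸ hw)
            · exact hh (h' ▸ hw)
            · exact hmed (h' ▸ hw)
          by_cases hlow : "low" ∈ ys
          · have h1 : (1 : Int) ≤ m := by
              have := hmax (pvRiskRank "low") (List.mem_map.mpr ⟨_, hlow, rfl⟩)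
              simpa [pvRiskRank] using this
            have hle : m ≤ 4 := hwm ▸ pvRiskRank_le w
            have : m = 1 := by omega
            rw [if_pos ((pvSet_contains_iff ys "low").mpr hlow), this]
            rfl
          · rw [if_neg (by simp [PySem.Set.contains, PySem.Set.mem_ofList, hlow])]
            have hne1 : m ≠ 1 := fun h => by
              rcases pvRiskRank_ge1 w (by omega : 1 ≤ pvRiskRank w) with h' | h' | h' | h'
              · exact hc (h' ▸ hw)
              · exact hh (h' ▸ hw)
              · exact hmed (h' ▸ hw)
              · exact hlow (h' ▸ hw)
            have hge0 : (0 : Int) ≤ m := by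
              have := hmax (pvRiskRank w) (List.mem_map.mpr ⟨_, hw, rfl⟩)
              have h0 : (0 : Int) ≤ pvRiskRank w := by
                unfold pvRiskRank; split_ifs <;> norm_num
              omega
            have hle : m ≤ 4 := hwm ▸ pvRiskRank_le w
            have : m = 0 := by omega
            rw [this]
            rfl

-- ===== VERDICT (by name: the statement is the Claim_ definition above) =====
theorem calculate_edge_color_py_spec : Claim_equal_calculate_edge_color_py := by
  intro xs _
  unfold Spec_calculate_edge_color_py
  exact pv_main xs
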